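-- pv_equiv track=rewrite | github.com/yarkoe/calculation-methods | lab_work_5/lab_work_5/orthogonal_polynomials/chebyshev_lagerr_polynomial.py | create_chebyshev_lagerr_polynomial_coefficients
-- ===== SOURCE A (Python) =====
-- def create_chebyshev_lagerr_polynomial_coefficients(alpha, n):
--     """
--     Creates x^(-alpha) * e^x * d^n(x^(alpha + n) * e^(-x))/d(x^n) polynomial coefficients and returns it.
--     @param alpha: Chebyshev-Lagerr polynomial value.
--     @param n: degree of derivative.
--     @return: list of polynomial coefficients.
--     """
--
--     coefficients_list = [0] * (alpha + n + 1)
--     coefficients_list[-1] = 1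
--
--     for i in range(1, n + 1):
--         pred_coefficients_list = coefficients_list.copy()
--
--         coefficients_list = [0] * (alpha + n + 1)
--         for j in range(alpha, alpha + n + 1):
--             if j != 0:
--                 coefficients_list[j - 1] += pred_coefficients_list[j] * j
--
--             coefficients_list[j] += pred_coefficients_list[j] * (-1)
--
--     # divide by x^alpha
--     for i in range(n + 1):
--         coefficients_list[i] = coefficients_list[i + alpha]
--
--     coefficients_list = coefficients_list[:n + 1]
--
--     return coefficients_list
-- ===== SOURCE B (Python) =====
-- def create_chebyshev_lagerr_polynomial_coefficients(alpha, n):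
--     """Closed form: coefficient of x^k is (-1)^k * (n!/k!) * C(n+alpha, n-k),
--     computed incrementally in O(n + alpha) integer operations."""
--     f = 1
--     for i in range(2, n + 1):
--         f *= i                                   # f = n!
--     b = 1
--     for i in range(1, alpha + 1):
--         b = b * (n + i) // i                     # b = C(n+alpha, alpha) = C(n+alpha, n)
--     coefficients = []
--     sign = 1
--     for k in range(n + 1):
--         coefficients.append(sign * f * b)
--         sign = -sign
--         f = f // (k + 1)                         # n!/(k+1)!
--         b = b * (n - k) // (alpha + k + 1)       # C(n+alpha, n-k-1)
--     return coefficients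
-- ===== Notes on version B (the rewrite author's own statement) =====
-- stated objective: faster
-- what changed: Replaces the n-fold symbolic differentiation over a length-(alpha+n+1) coefficient array by the closed form coeff_k = (-1)^k * (n!/k!) * C(n+alpha, n-k), computed with incrementally updated falling factorial and binomial, so no coefficient array and no nested derivative loop remain.
-- outside the precondition, e.g. on create_chebyshev_lagerr_polynomial_coefficients(3, -2): A returns [0], B returns []; on create_chebyshev_lagerr_polynomial_coefficients(2, -1): A returns [], B returns []
import Mathlib
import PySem

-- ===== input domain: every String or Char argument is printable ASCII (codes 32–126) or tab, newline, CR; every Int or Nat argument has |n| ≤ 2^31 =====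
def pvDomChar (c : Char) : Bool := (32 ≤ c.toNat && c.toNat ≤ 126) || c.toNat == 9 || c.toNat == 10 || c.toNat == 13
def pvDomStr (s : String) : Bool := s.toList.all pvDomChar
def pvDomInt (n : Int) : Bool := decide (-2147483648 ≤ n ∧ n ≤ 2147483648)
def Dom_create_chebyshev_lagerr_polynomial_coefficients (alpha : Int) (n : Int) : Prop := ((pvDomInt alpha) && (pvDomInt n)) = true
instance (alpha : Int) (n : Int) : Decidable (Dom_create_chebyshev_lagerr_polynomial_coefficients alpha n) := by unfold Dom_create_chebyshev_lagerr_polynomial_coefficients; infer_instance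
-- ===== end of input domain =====

-- B replaces A's n-fold symbolic differentiation over a length-(alpha+n+1) array by the
-- closed form coeff_k = (-1)^k * (n!/k!) * C(n+alpha, n-k) with incrementally updated
-- factors (objective: faster, O(n+alpha) instead of O(n*(alpha+n))).

-- ===== PORT A =====
def create_chebyshev_lagerr_polynomial_coefficients (alpha : Int) (n : Int) : List Int :=
  -- coefficients_list = [0] * (alpha + n + 1); coefficients_list[-1] = 1
  let cl0 : List Int := List.replicate (alpha + n + 1).toNat 0
  let cl1 := PySem.List.pySetD cl0 (-1) 1
  -- for i in range(1, n + 1): …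
  let cl2 := (PySem.List.pyRange 1 (n + 1) 1).foldl (fun cl _i =>
    let pred := cl
    let fresh : List Int := List.replicate (alpha + n + 1).toNat 0
    -- for j in range(alpha, alpha + n + 1): …
    (PySem.List.pyRange alpha (alpha + n + 1) 1).foldl (fun c j =>
      let c := if j ≠ 0 then
          PySem.List.pySetD c (j - 1) (PySem.List.pyGetD c (j - 1) 0 + PySem.List.pyGetD pred j 0 * j)
        else c
      PySem.List.pySetD c j (PySem.List.pyGetD c j 0 + PySem.List.pyGetD pred j 0 * (-1))) fresh) cl1
  -- for i in range(n + 1): coefficients_list[i] = coefficients_list[i + alpha]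
  let cl3 := (PySem.List.pyRange 0 (n + 1) 1).foldl (fun c i =>
    PySem.List.pySetD c i (PySem.List.pyGetD c (i + alpha) 0)) cl2
  -- coefficients_list[:n + 1]
  PySem.List.slice cl3 none (some (n + 1))

-- ===== PORT B =====
def create_chebyshev_lagerr_polynomial_coefficients_alt (alpha : Int) (n : Int) : List Int :=
  -- f = n!
  let f := (PySem.List.pyRange 2 (n + 1) 1).foldl (fun f i => f * i) 1
  -- b = C(n+alpha, alpha)
  let b := (PySem.List.pyRange 1 (alpha + 1) 1).foldl (fun b i => PySem.Int.floordiv (b * (n + i)) i) 1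
  -- for k in range(n + 1): append sign*f*b; sign, f, b updates
  let st := (PySem.List.pyRange 0 (n + 1) 1).foldl
    (fun (st : List Int × Int × Int × Int) k =>
      (st.1 ++ [st.2.1 * st.2.2.1 * st.2.2.2], -st.2.1,
       PySem.Int.floordiv st.2.2.1 (k + 1),
       PySem.Int.floordiv (st.2.2.2 * (n - k)) (alpha + k + 1)))
    (([] : List Int), 1, f, b)
  st.1

-- ===== PRECONDITION & SPEC =====
-- Pre_ excludes negative alpha (there A raises IndexError) and negative n (a negative
-- derivative degree: there A's slice/padding arithmetic returns accidental empty or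
-- zero-filled fragments, or raises IndexError when alpha + n < 0).
def Pre_create_chebyshev_lagerr_polynomial_coefficients (alpha : Int) (n : Int) : Prop :=
  0 ≤ alpha ∧ 0 ≤ n
instance (alpha : Int) (n : Int) : Decidable (Pre_create_chebyshev_lagerr_polynomial_coefficients alpha n) := by
  unfold Pre_create_chebyshev_lagerr_polynomial_coefficients; infer_instance
def pvWitness_create_chebyshev_lagerr_polynomial_coefficients : Int × Int := (1, 2)

def Spec_create_chebyshev_lagerr_polynomial_coefficients (alpha : Int) (n : Int) (out : List Int) : Prop :=
  out = create_chebyshev_lagerr_polynomial_coefficients_alt alpha n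
instance (alpha : Int) (n : Int) (out : List Int) : Decidable (Spec_create_chebyshev_lagerr_polynomial_coefficients alpha n out) := by
  unfold Spec_create_chebyshev_lagerr_polynomial_coefficients; infer_instance

-- ===== CLAIM (what is proved, stated in full; the proofs are below) =====
def Claim_equal_create_chebyshev_lagerr_polynomial_coefficients : Prop :=
  ∀ (alpha : Int) (n : Int), Dom_create_chebyshev_lagerr_polynomial_coefficients alpha n →
    Pre_create_chebyshev_lagerr_polynomial_coefficients alpha n →
    Spec_create_chebyshev_lagerr_polynomial_coefficients alpha n (create_chebyshev_lagerr_polynomial_coefficients alpha n)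

-- ===== LEMMAS AND PROOFS =====

-- proof-side abbreviation: the list [g 0, …, g (m-1)]
def rmap (m : Nat) (g : Nat → Int) : List Int := (List.range m).map g

-- entry of A's coefficient array after i derivative steps, at position p
def entryFun (a N i p : Nat) : Int :=
  (-1) ^ (i + (a + N - p)) * (i.choose (a + N - p) : Int) * ((a + N).descFactorial (a + N - p) : Int)

-- the closed-form coefficient B computes
def coeffC (a N k : Nat) : Int :=
  (-1) ^ k * ((N.factorial / k.factorial : Nat) : Int) * (((N + a).choose (N - k) : Nat) : Int)

lemma entry_zero (a N i q : Nat) (h : i < a + N - q) : entryFun a N i q = 0 := by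
  unfold entryFun
  rw [Nat.choose_eq_zero_of_lt h]
  ring

lemma rmap_set (m q : Nat) (v : Int) (g : Nat → Int) (hq : q < m) :
    (rmap m g).set q v = rmap m (fun p => if p = q then v else g p) := by
  apply List.ext_getElem (by simp [rmap])
  intro i h1 h2
  simp only [rmap, List.getElem_set, List.getElem_map, List.getElem_range] at *
  by_cases h : i = q <;> simp [h, Ne.symm]

lemma rmap_congr (m : Nat) (g h : Nat → Int) (H : ∀ p, p < m → g p = h p) :
    rmap m g = rmap m h := by
  unfold rmap
  exact List.map_congr_left (fun p hp => H p (List.mem_range.mp hp))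

lemma rmap_pySetD (m q : Nat) (v : Int) (g : Nat → Int) :
    PySem.List.pySetD (rmap m g) (q : Int) v = (rmap m g).set q v := by
  simp

lemma rmap_pyGetD (m q : Nat) (g : Nat → Int) (hq : q < m) :
    PySem.List.pyGetD (rmap m g) (q : Int) 0 = g q := by
  simp [rmap, List.getElem?_range hq]

lemma replicate_eq_rmap (m : Nat) : List.replicate m (0 : Int) = rmap m (fun _ => 0) := by
  simp [rmap, List.map_const']

-- initial array: zeros with last entry 1
lemma init_eq (a N : Nat) :
    PySem.List.pySetD (List.replicate (a + N + 1) (0 : Int)) (-1) 1 = rmap (a + N + 1) (entryFun a N 0) := by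
  have h1 : PySem.List.pyIdx? (List.replicate (a + N + 1) (0 : Int)).length (-1) = some (a + N) := by
    simp [PySem.List.pyIdx?]
  rw [show (1 : Int) = ((1 : Nat) : Int) by norm_num] at h1 ⊢
  simp only [PySem.List.pySetD, PySem.List.pySet?, h1, Option.map_some, Option.getD_some]
  rw [replicate_eq_rmap, rmap_set _ _ _ _ (by omega)]
  apply rmap_congr
  intro p hp
  by_cases h : p = a + N
  · simp [h, entryFun]
  · have : 0 < a + N - p := by omega
    simp [h, entryFun, Nat.choose_eq_zero_of_lt (by omega : 0 < a + N - p)]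

-- partial entries while the inner loop has processed j = a … t-1
def pEnt (a N i t p : Nat) : Int :=
  (if a ≤ p + 1 ∧ p + 1 < t then entryFun a N i (p + 1) * ((p : Int) + 1) else 0) +
  (if a ≤ p ∧ p < t then -(entryFun a N i p) else 0)

-- one iteration of the inner loop
lemma inner_step (a N i t : Nat) (ht : a ≤ t) (ht' : t ≤ a + N) :
    (let c := if ((t : Nat) : Int) ≠ 0 then
        PySem.List.pySetD (rmap (a + N + 1) (pEnt a N i t)) (((t : Nat) : Int) - 1)
          (PySem.List.pyGetD (rmap (a + N + 1) (pEnt a N i t)) (((t : Nat) : Int) - 1) 0 +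
           PySem.List.pyGetD (rmap (a + N + 1) (entryFun a N i)) ((t : Nat) : Int) 0 * ((t : Nat) : Int))
      else rmap (a + N + 1) (pEnt a N i t);
     PySem.List.pySetD c ((t : Nat) : Int)
       (PySem.List.pyGetD c ((t : Nat) : Int) 0 +
        PySem.List.pyGetD (rmap (a + N + 1) (entryFun a N i)) ((t : Nat) : Int) 0 * (-1)))
    = rmap (a + N + 1) (pEnt a N i (t + 1)) := by
  simp only []
  by_cases h0 : (t : Int) = 0
  · have ht0 : t = 0 := by exact_mod_cast h0
    subst ht0
    have ha : a = 0 := by omega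
    subst ha
    rw [if_neg (by simp)]
    rw [rmap_pyGetD (0 + N + 1) 0 (pEnt 0 N i 0) (by omega),
        rmap_pyGetD (0 + N + 1) 0 (entryFun 0 N i) (by omega),
        rmap_pySetD, rmap_set _ _ _ _ (by omega)]
    apply rmap_congr
    intro p hp
    by_cases hpz : p = 0
    · subst hpz
      rw [if_pos rfl]
      unfold pEnt
      split_ifs <;> (first | ring1 | (exfalso; omega))
    · rw [if_neg hpz]
      unfold pEnt
      split_ifs <;> (first | ring1 | (exfalso; omega))
  · have ht1 : 1 ≤ t := by
      have : t ≠ 0 := by exact_mod_cast h0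
      omega
    rw [if_pos h0]
    rw [show (t : Int) - 1 = ((t - 1 : Nat) : Int) by omega]
    rw [rmap_pyGetD (a + N + 1) (t - 1) (pEnt a N i t) (by omega),
        rmap_pyGetD (a + N + 1) t (entryFun a N i) (by omega),
        rmap_pySetD, rmap_set _ _ _ _ (by omega),
        rmap_pyGetD (a + N + 1) t _ (by omega),
        rmap_pySetD, rmap_set _ _ _ _ (by omega)]
    rw [if_neg (by omega : ¬ t = t - 1)]
    apply rmap_congr
    intro p hp
    by_cases hpt : p = t
    · subst hpt
      rw [if_pos rfl]
      unfold pEnt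
      split_ifs <;> (first | ring1 | (exfalso; omega))
    · rw [if_neg hpt]
      by_cases hpt1 : p = t - 1
      · subst hpt1
        rw [if_pos rfl]
        unfold pEnt
        have e2 : t - 1 + 1 = t := by omega
        have e1 : ((t - 1 : Nat) : Int) + 1 = (t : Int) := by push_cast; omega
        rw [e2, e1]
        split_ifs <;> (first | ring1 | (exfalso; omega))
      · rw [if_neg hpt1]
        unfold pEnt
        split_ifs <;> (first | ring1 | (exfalso; omega))

-- the whole inner loop, by induction on the remaining range
lemma inner_fold (a N i : Nat) : ∀ (r t : Nat), t + r = a + N + 1 → a ≤ t →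
    (PySem.List.pyRange (t : Int) ((a : Int) + (N : Int) + 1) 1).foldl (fun c j =>
      let c := if j ≠ 0 then
          PySem.List.pySetD c (j - 1) (PySem.List.pyGetD c (j - 1) 0 + PySem.List.pyGetD (rmap (a + N + 1) (entryFun a N i)) j 0 * j)
        else c
      PySem.List.pySetD c j (PySem.List.pyGetD c j 0 + PySem.List.pyGetD (rmap (a + N + 1) (entryFun a N i)) j 0 * (-1)))
      (rmap (a + N + 1) (pEnt a N i t))
    = rmap (a + N + 1) (pEnt a N i (a + N + 1)) := by
  intro r
  induction r with
  | zero =>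
    intro t h1 h2
    rw [PySem.List.pyRange_one_eq_nil (by omega), List.foldl_nil, show t = a + N + 1 by omega]
  | succ r ih =>
    intro t h1 h2
    rw [PySem.List.pyRange_one_cons (by omega), List.foldl_cons]
    rw [inner_step a N i t h2 (by omega)]
    rw [show ((t : Nat) : Int) + 1 = ((t + 1 : Nat) : Int) by push_cast; ring]
    exact ih (t + 1) (by omega) (by omega)

-- completed partial entries are the entries after one more derivative step
lemma pEnt_full (a N i : Nat) (hi : i < N) (p : Nat) (hp : p < a + N + 1) :
    pEnt a N i (a + N + 1) p = entryFun a N (i + 1) p := by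
  unfold pEnt
  by_cases hpa : p = a + N
  · subst hpa
    rw [if_neg (by omega), if_pos (by omega)]
    unfold entryFun
    simp only [Nat.sub_self, Nat.choose_zero_right, Nat.descFactorial_zero, Nat.cast_one, Nat.add_zero]
    rw [pow_succ]
    ring
  · by_cases hlo : p < a
    · have z1 : entryFun a N i (p + 1) = 0 := entry_zero _ _ _ _ (by omega)
      have z2 : entryFun a N (i + 1) p = 0 := entry_zero _ _ _ _ (by omega)
      have z3 : entryFun a N i p = 0 := entry_zero _ _ _ _ (by omega)
      rw [z2, z1, z3]
      split_ifs <;> ring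
    · -- a ≤ p < a + N : the Pascal step
      have hap : a ≤ p := by omega
      have hplt : p < a + N := by omega
      rw [if_pos (by omega), if_pos (by omega)]
      set k := a + N - (p + 1) with hk
      have h2 : a + N - p = k + 1 := by omega
      have h3 : a + N - k = p + 1 := by omega
      unfold entryFun
      rw [h2]
      have hD : (((a + N).descFactorial (k + 1) : Nat) : Int)
          = ((p : Int) + 1) * (((a + N).descFactorial k : Nat) : Int) := by
        rw [Nat.descFactorial_succ, h3]
        push_cast
        ring
      have hC : ((Nat.choose (i + 1) (k + 1) : Nat) : Int)
          = ((Nat.choose i k : Nat) : Int) + ((Nat.choose i (k + 1) : Nat) : Int) := by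
        rw [Nat.choose_succ_succ]
        push_cast
        ring
      have hs1 : ((-1 : Int)) ^ (i + (k + 1)) = -((-1 : Int)) ^ (i + k) := by
        rw [show i + (k + 1) = (i + k) + 1 from rfl, pow_succ]
        ring
      have hs2 : ((-1 : Int)) ^ (i + 1 + (k + 1)) = ((-1 : Int)) ^ (i + k) := by
        rw [show i + 1 + (k + 1) = (i + k) + 1 + 1 by omega, pow_succ, pow_succ]
        ring
      rw [hD, hC, hs1, hs2]
      ring

-- the outer loop
lemma outer_fold (a N : Nat) : ∀ (i : Nat), i ≤ N →
    (PySem.List.pyRange 1 ((i : Int) + 1) 1).foldl (fun cl _i =>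
      (PySem.List.pyRange (a : Int) ((a : Int) + (N : Int) + 1) 1).foldl (fun c j =>
        let c := if j ≠ 0 then
            PySem.List.pySetD c (j - 1) (PySem.List.pyGetD c (j - 1) 0 + PySem.List.pyGetD cl j 0 * j)
          else c
        PySem.List.pySetD c j (PySem.List.pyGetD c j 0 + PySem.List.pyGetD cl j 0 * (-1)))
        (List.replicate (a + N + 1) (0 : Int)))
      (rmap (a + N + 1) (entryFun a N 0))
    = rmap (a + N + 1) (entryFun a N i) := by
  intro i
  induction i with
  | zero =>
    intro _
    rw [show ((0 : Nat) : Int) + 1 = (1 : Int) by norm_num,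
        show PySem.List.pyRange (1 : Int) (1 : Int) 1 = [] from PySem.List.pyRange_one_eq_nil (by omega),
        List.foldl_nil]
  | succ i ih =>
    intro hi
    rw [show ((i + 1 : Nat) : Int) + 1 = (((i : Nat) : Int) + 1) + 1 by push_cast; ring]
    rw [PySem.List.pyRange_one_succ_right (a := 1) (b := ((i : Nat) : Int) + 1) (by push_cast; omega),
        List.foldl_append, ih (by omega), List.foldl_cons, List.foldl_nil]
    have hfresh : List.replicate (a + N + 1) (0 : Int) = rmap (a + N + 1) (pEnt a N i a) := by
      rw [replicate_eq_rmap]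
      apply rmap_congr
      intro p hp
      unfold pEnt
      rw [if_neg (by omega), if_neg (by omega)]
      norm_num
    rw [hfresh, inner_fold a N i (N + 1) a (by omega) (le_refl a)]
    exact rmap_congr _ _ _ (fun p hp => pEnt_full a N i (by omega) p hp)

-- the copy loop coefficients_list[i] = coefficients_list[i + alpha]
def gCopy (a N t p : Nat) : Int := if p < t then entryFun a N N (p + a) else entryFun a N N p

lemma copy_fold (a N : Nat) : ∀ (r t : Nat), t + r = N + 1 →
    (PySem.List.pyRange (t : Int) ((N : Int) + 1) 1).foldl (fun c i =>
      PySem.List.pySetD c i (PySem.List.pyGetD c (i + (a : Int)) 0))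
      (rmap (a + N + 1) (gCopy a N t))
    = rmap (a + N + 1) (gCopy a N (N + 1)) := by
  intro r
  induction r with
  | zero =>
    intro t h1
    rw [PySem.List.pyRange_one_eq_nil (by omega), List.foldl_nil, show t = N + 1 by omega]
  | succ r ih =>
    intro t h1
    rw [PySem.List.pyRange_one_cons (by omega), List.foldl_cons]
    have hstep : PySem.List.pySetD (rmap (a + N + 1) (gCopy a N t)) ((t : Nat) : Int)
        (PySem.List.pyGetD (rmap (a + N + 1) (gCopy a N t)) (((t : Nat) : Int) + (a : Int)) 0)
        = rmap (a + N + 1) (gCopy a N (t + 1)) := by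
      rw [show ((t : Nat) : Int) + (a : Int) = ((t + a : Nat) : Int) by push_cast; ring]
      rw [rmap_pyGetD (a + N + 1) (t + a) _ (by omega), rmap_pySetD, rmap_set _ _ _ _ (by omega)]
      apply rmap_congr
      intro p hp
      by_cases hpt : p = t
      · subst hpt
        rw [if_pos rfl]
        unfold gCopy
        rw [if_neg (by omega), if_pos (by omega)]
      · rw [if_neg hpt]
        unfold gCopy
        by_cases hlt : p < t
        · rw [if_pos hlt, if_pos (by omega)]
        · rw [if_neg hlt, if_neg (by omega)]
    rw [hstep]
    rw [show ((t : Nat) : Int) + 1 = ((t + 1 : Nat) : Int) by push_cast; ring]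
    exact ih (t + 1) (by omega)

-- A's final value, in closed form
lemma portA_eq (a N : Nat) :
    create_chebyshev_lagerr_polynomial_coefficients (a : Int) (N : Int)
    = (List.range (N + 1)).map (fun p => entryFun a N N (p + a)) := by
  simp only [create_chebyshev_lagerr_polynomial_coefficients]
  simp only [show (((a : Int) + (N : Int) + 1).toNat) = a + N + 1 by omega]
  rw [init_eq, outer_fold a N N (le_refl N)]
  rw [show rmap (a + N + 1) (entryFun a N N) = rmap (a + N + 1) (gCopy a N 0) from
    rmap_congr _ _ _ (fun p hp => by unfold gCopy; rw [if_neg (by omega)])]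
  have hcf := copy_fold a N (N + 1) 0 (by omega)
  simp only [Nat.cast_zero] at hcf
  rw [hcf]
  rw [show ((N : Int) + 1) = ((N + 1 : Nat) : Int) by push_cast; ring, PySem.List.slice_to_natCast]
  unfold rmap
  rw [← List.map_take, List.take_range, show min (N + 1) (a + N + 1) = N + 1 by omega]
  apply List.map_congr_left
  intro p hp
  unfold gCopy
  rw [if_pos (List.mem_range.mp hp)]

-- B-side loop 1: the factorial
lemma factB (N : Nat) :
    (PySem.List.pyRange 2 ((N : Int) + 1) 1).foldl (fun f i => f * i) 1 = (N.factorial : Int) := by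
  induction N with
  | zero => rw [PySem.List.pyRange_one_eq_nil (by norm_num)]; simp [Nat.factorial]
  | succ M ih =>
    cases M with
    | zero => rw [PySem.List.pyRange_one_eq_nil (by norm_num)]; simp [Nat.factorial]
    | succ K =>
      have hb : ((K + 1 + 1 : Nat) : Int) + 1 = (((K + 1 : Nat) : Int) + 1) + 1 := by push_cast; ring
      rw [hb, PySem.List.pyRange_one_succ_right (by push_cast; omega), List.foldl_append, ih]
      show (K + 1).factorial * (((K + 1 : Nat) : Int) + 1) = _
      push_cast [Nat.factorial_succ (K + 1)]
      ring

-- B-side loop 2: the binomial C(N+a, a)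
lemma binomB (N : Nat) : ∀ (a : Nat),
    (PySem.List.pyRange 1 ((a : Int) + 1) 1).foldl (fun b i => PySem.Int.floordiv (b * ((N : Int) + i)) i) 1
    = ((N + a).choose a : Int) := by
  intro a
  induction a with
  | zero => rw [PySem.List.pyRange_one_eq_nil (by norm_num)]; simp
  | succ b ih =>
    have hb : ((b + 1 : Nat) : Int) + 1 = (((b : Nat) : Int) + 1) + 1 := by push_cast; ring
    rw [hb, PySem.List.pyRange_one_succ_right (by push_cast; omega), List.foldl_append, ih]
    show PySem.Int.floordiv (((N + b).choose b : Int) * ((N : Int) + ((b : Int) + 1))) ((b : Int) + 1) = _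
    have hc : ((N + b).choose b : Int) * ((N : Int) + ((b : Int) + 1))
        = (((N + b).choose b * (N + b + 1) : Nat) : Int) := by push_cast; ring
    have hd : ((b : Int) + 1) = (((b + 1 : Nat)) : Int) := by push_cast; ring
    rw [hc, hd, PySem.Int.floordiv_natCast]
    have he : (N + b).choose b * (N + b + 1) = (N + b + 1).choose (b + 1) * (b + 1) := by
      have h := Nat.succ_mul_choose_eq (N + b) b
      simp only [Nat.succ_eq_add_one] at h
      rw [mul_comm]
      exact h
    rw [he, Nat.mul_div_cancel _ (Nat.succ_pos b)]
    norm_cast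

-- B-side main loop invariant
lemma mainB (alpha N : Nat) : ∀ (m j : Nat) (out : List Int) (sign f b : Int),
    j + m = N + 1 → sign = (-1) ^ j → f = ((N.factorial / j.factorial : Nat) : Int) →
    (m ≠ 0 → b = (((N + alpha).choose (N - j) : Nat) : Int)) →
    ((PySem.List.pyRange (j : Int) ((N : Int) + 1) 1).foldl
      (fun (st : List Int × Int × Int × Int) k =>
        (st.1 ++ [st.2.1 * st.2.2.1 * st.2.2.2], -st.2.1,
         PySem.Int.floordiv st.2.2.1 (k + 1),
         PySem.Int.floordiv (st.2.2.2 * ((N : Int) - k)) ((alpha : Int) + k + 1)))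
      (out, sign, f, b)).1
    = out ++ (List.range m).map (fun t => coeffC alpha N (j + t)) := by
  intro m
  induction m with
  | zero =>
    intro j out sign f b hj _ _ _
    rw [PySem.List.pyRange_one_eq_nil (by omega)]
    simp
  | succ m ih =>
    intro j out sign f b hj hsign hf hb
    have hjN : j ≤ N := by omega
    rw [PySem.List.pyRange_one_cons (by omega)]
    rw [List.foldl_cons]
    have hj1 : (j : Int) + 1 = ((j + 1 : Nat) : Int) := by push_cast; ring
    rw [hj1]
    have hb' := hb (Nat.succ_ne_zero m)
    dsimp only [List.foldl_cons]
    have step : (out ++ [sign * f * b], -sign,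
        PySem.Int.floordiv f (((j + 1 : Nat) : Int)),
        PySem.Int.floordiv (b * ((N : Int) - (j : Int))) ((alpha : Int) + (j : Int) + 1))
        = (out ++ [coeffC alpha N j], (-1 : Int) ^ (j + 1),
           ((N.factorial / (j + 1).factorial : Nat) : Int),
           PySem.Int.floordiv (b * ((N : Int) - (j : Int))) ((alpha : Int) + (j : Int) + 1)) := by
      congr 1
      · rw [hsign, hf, hb']; rfl
      congr 1
      · rw [hsign]; rw [pow_succ]; ring
      congr 1
      · rw [hf, PySem.Int.floordiv_natCast]
        congr 1
        rw [Nat.div_div_eq_div_mul, Nat.factorial_succ, Nat.mul_comm]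
    rw [step]
    rw [ih (j + 1) (out ++ [coeffC alpha N j]) _ _ _ (by omega) rfl rfl ?_]
    · rw [List.append_assoc]
      congr 1
      rw [List.range_succ_eq_map, List.map_cons, List.map_map, List.singleton_append]
      congr 1
      apply List.map_congr_left
      intro t _
      simp only [Function.comp_apply]
      congr 1
      omega
    · intro hm
      have hjN' : j < N := by omega
      rw [hb']
      have e1 : ((N : Int) - (j : Int)) = ((N - j : Nat) : Int) := by omega
      have e2 : (alpha : Int) + (j : Int) + 1 = ((alpha + j + 1 : Nat) : Int) := by push_cast; ring
      have e3 : (((N + alpha).choose (N - j) : Nat) : Int) * ((N - j : Nat) : Int)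
          = (((N + alpha).choose (N - j) * (N - j) : Nat) : Int) := by push_cast; ring
      rw [e1, e2, e3, PySem.Int.floordiv_natCast]
      have key : (N + alpha).choose (N - j) * (N - j) = (N + alpha).choose (N - (j + 1)) * (alpha + j + 1) := by
        have h := Nat.choose_succ_right_eq (N + alpha) (N - j - 1)
        have ha : N - j - 1 + 1 = N - j := by omega
        have hb2 : N + alpha - (N - j - 1) = alpha + j + 1 := by omega
        have hc2 : N - (j + 1) = N - j - 1 := by omega
        rw [ha, hb2] at h
        rw [hc2]
        exact h
      rw [key, Nat.mul_div_cancel _ (by omega : 0 < alpha + j + 1)]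

lemma portB_eq (a N : Nat) :
    create_chebyshev_lagerr_polynomial_coefficients_alt (a : Int) (N : Int)
    = (List.range (N + 1)).map (coeffC a N) := by
  simp only [create_chebyshev_lagerr_polynomial_coefficients_alt]
  rw [factB, binomB]
  have hcs : (N + a).choose a = (N + a).choose (N - 0) := by
    rw [← Nat.choose_symm (Nat.le_add_left a N)]
    congr 1
    omega
  have h := mainB a N (N + 1) 0 [] ((-1 : Int) ^ 0) ((N.factorial / Nat.factorial 0 : Nat) : Int)
      (((N + a).choose (N - 0) : Nat) : Int) (by omega) rfl rfl (fun _ => rfl)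
  simp only [pow_zero, Nat.factorial_zero, Nat.div_one, ← hcs, List.nil_append, Nat.zero_add, Nat.cast_zero] at h
  rw [h]

-- pointwise identity between the two closed forms
lemma coeff_agree (a N k : Nat) (hk : k ≤ N) : entryFun a N N (k + a) = coeffC a N k := by
  unfold entryFun coeffC
  have h1 : a + N - (k + a) = N - k := by omega
  have h2 : N + (N - k) = 2 * (N - k) + k := by omega
  have hsign : ((-1 : Int)) ^ (N + (N - k)) = (-1) ^ k := by
    rw [h2, pow_add, pow_mul]
    norm_num
  rw [h1, hsign]
  have hmag : N.choose (N - k) * (a + N).descFactorial (N - k)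
      = (N.factorial / k.factorial) * (N + a).choose (N - k) := by
    have e1 : (a + N).descFactorial (N - k) = (N - k).factorial * (a + N).choose (N - k) :=
      Nat.descFactorial_eq_factorial_mul_choose _ _
    have e2 : N.descFactorial (N - k) = (N - k).factorial * N.choose (N - k) :=
      Nat.descFactorial_eq_factorial_mul_choose _ _
    have e3 : N.descFactorial (N - k) = N.factorial / k.factorial := by
      rw [Nat.descFactorial_eq_div (by omega : N - k ≤ N)]
      have : N - (N - k) = k := by omega
      rw [this]
    calc N.choose (N - k) * (a + N).descFactorial (N - k)
        = N.choose (N - k) * ((N - k).factorial * (a + N).choose (N - k)) := by rw [e1]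
      _ = ((N - k).factorial * N.choose (N - k)) * (a + N).choose (N - k) := by ring
      _ = (N.factorial / k.factorial) * (N + a).choose (N - k) := by
          rw [← e2, e3, Nat.add_comm a N]
  have hc : ((N.choose (N - k) * (a + N).descFactorial (N - k) : Nat) : Int)
      = ((N.factorial / k.factorial * (N + a).choose (N - k) : Nat) : Int) := by
    exact_mod_cast congrArg (fun x : Nat => (x : Int)) hmag
  rw [Nat.cast_mul, Nat.cast_mul] at hc
  linear_combination ((-1 : Int)) ^ k * hc

-- ===== VERDICT (by name: the statement is the Claim_ definition above) =====
theorem create_chebyshev_lagerr_polynomial_coefficients_spec : Claim_equal_create_chebyshev_lagerr_polynomial_coefficients := by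
  intro alpha n _hdom hpre
  obtain ⟨a, rfl⟩ := Int.eq_ofNat_of_zero_le hpre.1
  obtain ⟨N, rfl⟩ := Int.eq_ofNat_of_zero_le hpre.2
  unfold Spec_create_chebyshev_lagerr_polynomial_coefficients
  rw [portA_eq, portB_eq]
  exact List.map_congr_left (fun p hp => coeff_agree a N p (by
    simpa using Nat.lt_succ_iff.mp (List.mem_range.mp hp)))
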